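-- pv_equiv track=rewrite | github.com/huangxi183/QaSystem-big | src/cs.nyu.rbda.QaSystem/analytic/input_extraction/find_sent.py | find_sent
-- ===== SOURCE A (Python) =====
-- def find_sent(l, ans_start):
--     if len(l) == 1:
--         return 0
--     else:
--         tmp = 0
--         for i, element in enumerate(l):
--             if tmp+len(element) > ans_start:
--                 return i
--             tmp += len(element)+1 # add 1 because of the delimiter ' ' between tokenized sentence
-- ===== SOURCE B (Python) =====
-- def find_sent(l, ans_start):
--     # Prefix-sum + binary search: build each sentence's exclusive end offset once,
--     # then bisect for the first end offset strictly greater than ans_start.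
--     if len(l) == 1:
--         return 0
--     ends = []
--     acc = 0
--     for el in l:
--         acc += len(el)
--         ends.append(acc)
--         acc += 1  # delimiter ' '
--     lo, hi = 0, len(ends)
--     while lo < hi:
--         mid = (lo + hi) // 2
--         if ends[mid] > ans_start:
--             hi = mid
--         else:
--             lo = mid + 1
--     if lo == len(l):
--         return None
--     return lo
-- ===== Notes on version B (the rewrite author's own statement) =====
-- stated objective: alternative
-- what changed: Replaces the linear scan carrying a running offset with a one-pass prefix-sum of sentence end offsets followed by a hand-written binary search (bisect_right) for the first end offset exceeding ans_start.
-- outside the precondition, e.g. on find_sent(['ab', 'cd'], 99): A returns None, B returns None; on find_sent([], 0): A returns None, B returns None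
import Mathlib
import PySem

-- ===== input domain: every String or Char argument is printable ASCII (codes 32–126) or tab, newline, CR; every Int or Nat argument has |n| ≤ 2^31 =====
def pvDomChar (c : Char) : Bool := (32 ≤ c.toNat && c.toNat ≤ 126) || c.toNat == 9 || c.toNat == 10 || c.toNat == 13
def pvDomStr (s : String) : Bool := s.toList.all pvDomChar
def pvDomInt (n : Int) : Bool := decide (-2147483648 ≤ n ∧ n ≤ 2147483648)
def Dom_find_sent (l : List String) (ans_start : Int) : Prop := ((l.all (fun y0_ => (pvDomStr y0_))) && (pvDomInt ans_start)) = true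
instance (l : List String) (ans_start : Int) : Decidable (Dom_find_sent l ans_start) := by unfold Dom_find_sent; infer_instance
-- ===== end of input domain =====

-- B replaces A's linear running-offset scan with a prefix-sum of end offsets plus a binary
-- search (alternative decomposition, same asymptotic cost on the build pass).


-- ===== PORT A =====
-- the for-loop over enumerate(l) with running offset tmp; the [] case is Python's
-- fall-off-the-loop 'return None' (excluded by Pre_find_sent; 0 is a dummy)
def find_sent_go (ans_start : Int) (i : Int) (tmp : Int) : List String → Int
  | [] => 0
  | e :: rest =>
    if tmp + PySem.Str.len e > ans_start then i
    else find_sent_go ans_start (i + 1) (tmp + PySem.Str.len e + 1) rest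

def find_sent (l : List String) (ans_start : Int) : Int :=
  if l.length = 1 then 0 else find_sent_go ans_start 0 0 l

-- ===== PORT B =====
-- Source B's first loop: append acc+len(el), then acc += 1 for the delimiter
def buildEnds (acc : Int) : List String → List Int
  | [] => []
  | e :: r => (acc + PySem.Str.len e) :: buildEnds (acc + PySem.Str.len e + 1) r

-- Source B's while-loop binary search
def bsearchGo (ends : List Int) (ans_start : Int) (lo hi : Nat) : Nat :=
  if h : lo < hi then
    let mid := (lo + hi) / 2
    if PySem.List.pyGetD ends (mid : Int) 0 > ans_start then bsearchGo ends ans_start lo mid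
    else bsearchGo ends ans_start (mid + 1) hi
  else lo
termination_by hi - lo
decreasing_by all_goals omega

def find_sent_alt (l : List String) (ans_start : Int) : Int :=
  if l.length = 1 then 0
  else
    let ends := buildEnds 0 l
    let lo := bsearchGo ends ans_start 0 ends.length
    if lo = l.length then 0   -- Python's 'return None' (excluded by Pre_find_sent; 0 is a dummy)
    else (lo : Int)

-- ===== PRECONDITION & SPEC =====
-- Pre_ excludes exactly the inputs on which Python A falls off its loop and returns None
-- (no Int value): the empty list, and ans_start at or beyond the last sentence's end offset.
def Pre_find_sent (l : List String) (ans_start : Int) : Prop :=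
  l.length = 1 ∨ (l ≠ [] ∧ ans_start < (l.map PySem.Str.len).sum + l.length - 1)
instance (l : List String) (ans_start : Int) : Decidable (Pre_find_sent l ans_start) := by
  unfold Pre_find_sent; infer_instance

def pvWitness_find_sent : List String × Int := (["ab", "cd"], 1)

def Spec_find_sent (l : List String) (ans_start : Int) (out : Int) : Prop := out = find_sent_alt l ans_start
instance (l : List String) (ans_start : Int) (out : Int) : Decidable (Spec_find_sent l ans_start out) := by unfold Spec_find_sent; infer_instance

-- ===== CLAIM (what is proved, stated in full; the proofs are below) =====
def Claim_equal_find_sent : Prop := ∀ (l : List String) (ans_start : Int), Dom_find_sent l ans_start → Pre_find_sent l ans_start → Spec_find_sent l ans_start (find_sent l ans_start)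

-- ===== LEMMAS AND PROOFS =====

theorem len_nonneg (s : String) : 0 ≤ PySem.Str.len s := by
  simp [PySem.Str.len_eq]

theorem length_buildEnds (a : Int) (l : List String) : (buildEnds a l).length = l.length := by
  induction l generalizing a with
  | nil => rfl
  | cons e r ih => simp [buildEnds, ih]

theorem le_of_mem_buildEnds (a : Int) (l : List String) :
    ∀ x ∈ buildEnds a l, a ≤ x := by
  induction l generalizing a with
  | nil => simp [buildEnds]
  | cons e r ih =>
    intro x hx
    simp only [buildEnds, List.mem_cons] at hx
    rcases hx with rfl | hx
    · have := len_nonneg e; omega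
    · have := ih (a + PySem.Str.len e + 1) x hx
      have := len_nonneg e; omega

theorem pairwise_buildEnds (a : Int) (l : List String) :
    List.Pairwise (· < ·) (buildEnds a l) := by
  induction l generalizing a with
  | nil => simp [buildEnds]
  | cons e r ih =>
    refine List.Pairwise.cons ?_ (ih _)
    intro x hx
    have := le_of_mem_buildEnds (a + PySem.Str.len e + 1) r x hx
    omega

-- A's scan computes the first index of buildEnds whose value exceeds ans_start
theorem go_eq_findIdx (ans_start : Int) (l : List String) :
    ∀ (a i : Int),
      find_sent_go ans_start i a l =
        if (buildEnds a l).findIdx (fun x => decide (ans_start < x)) < l.length then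
          i + ((buildEnds a l).findIdx (fun x => decide (ans_start < x)) : Int)
        else 0 := by
  induction l with
  | nil => intro a i; simp [find_sent_go, buildEnds]
  | cons e r ih =>
    intro a i
    simp only [find_sent_go, buildEnds, List.findIdx_cons, List.length_cons]
    by_cases h : a + PySem.Str.len e > ans_start
    · have hb : (decide (ans_start < a + PySem.Str.len e)) = true := decide_eq_true (by omega)
      rw [if_pos h, hb]
      simp only [cond_true]
      rw [if_pos (by omega)]
      simp
    · have hb : (decide (ans_start < a + PySem.Str.len e)) = false := decide_eq_false (by omega)
      rw [if_neg h, hb]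
      simp only [cond_false]
      rw [ih (a + PySem.Str.len e + 1) (i + 1)]
      by_cases hk : (buildEnds (a + PySem.Str.len e + 1) r).findIdx
          (fun x => decide (ans_start < x)) < r.length
      · rw [if_pos hk, if_pos (by omega)]
        push_cast
        ring
      · rw [if_neg hk, if_neg (by omega)]

-- characterisation of findIdx by its defining properties
theorem findIdx_eq_of (p : Int → Bool) (xs : List Int) (n : Nat) (hn : n ≤ xs.length)
    (h1 : ∀ j (hj : j < n), ¬ p (xs[j]'(by omega)) = true)
    (h2 : n = xs.length ∨ ∃ (h : n < xs.length), p (xs[n]'h) = true) :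
    xs.findIdx p = n := by
  rcases Nat.lt_trichotomy (xs.findIdx p) n with hlt | heq | hgt
  · exact absurd (List.findIdx_getElem (w := by omega)) (h1 _ hlt)
  · exact heq
  · rcases h2 with rfl | ⟨h, hp⟩
    · have := List.findIdx_le_length (p := p) (xs := xs)
      omega
    · have hfalse := List.not_of_lt_findIdx hgt
      exact absurd hp (by simpa using hfalse)

-- Source B's binary search converges to findIdx, given sortedness and the loop invariants
theorem bsearch_eq_findIdx_fuel (ends : List Int) (ans_start : Int)
    (hs : List.Pairwise (· < ·) ends) :
    ∀ (n lo hi : Nat) (hfuel : hi - lo ≤ n) (hle : lo ≤ hi) (hhi : hi ≤ ends.length)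
      (hlow : ∀ j (hj : j < lo), ¬ (decide (ans_start < ends[j]'(by omega))) = true)
      (hhigh : ∀ j (hj : j < ends.length), hi ≤ j → (decide (ans_start < ends[j])) = true),
      bsearchGo ends ans_start lo hi = ends.findIdx (fun x => decide (ans_start < x)) := by
  intro n
  induction n with
  | zero =>
    intro lo hi hfuel hle hhi hlow hhigh
    rw [bsearchGo, dif_neg (by omega)]
    have hlohi : lo = hi := by omega
    refine (findIdx_eq_of _ _ lo (by omega) hlow ?_).symm
    rcases Nat.lt_or_ge lo ends.length with hl | hl
    · exact Or.inr ⟨hl, hhigh lo hl (by omega)⟩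
    · exact Or.inl (by omega)
  | succ m IH =>
    intro lo hi hfuel hle hhi hlow hhigh
    rw [bsearchGo]
    by_cases h : lo < hi
    · rw [dif_pos h]
      have hmidlt : (lo + hi) / 2 < ends.length := by omega
      have hget : PySem.List.pyGetD ends (((lo + hi) / 2 : Nat) : Int) 0 = ends[(lo + hi) / 2] := by
        rw [PySem.List.pyGetD_natCast]
        exact List.getD_eq_getElem _ _ hmidlt
      by_cases hp : ends[(lo + hi) / 2] > ans_start
      · rw [if_pos (by rw [hget]; exact hp)]
        refine IH lo ((lo + hi) / 2) (by omega) (by omega) (by omega) hlow ?_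
        intro j hj hmid
        rcases Nat.eq_or_lt_of_le hmid with heq | hlt
        · subst heq
          simp only [decide_eq_true_eq]
          omega
        · have := (List.pairwise_iff_getElem.mp hs) _ _ hmidlt hj hlt
          simp only [decide_eq_true_eq]
          omega
      · rw [if_neg (by rw [hget]; exact hp)]
        refine IH ((lo + hi) / 2 + 1) hi (by omega) (by omega) hhi ?_ hhigh
        intro j hj
        rcases Nat.lt_or_ge j lo with hlo | hge
        · exact hlow j hlo
        · have hjm : j ≤ (lo + hi) / 2 := by omega
          rcases Nat.eq_or_lt_of_le hjm with heq | hlt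
          · subst heq
            simp only [decide_eq_true_eq]
            omega
          · have := (List.pairwise_iff_getElem.mp hs) j ((lo + hi) / 2) (by omega) hmidlt hlt
            simp only [decide_eq_true_eq]
            omega
    · rw [dif_neg h]
      have hlohi : lo = hi := by omega
      refine (findIdx_eq_of _ _ lo (by omega) hlow ?_).symm
      rcases Nat.lt_or_ge lo ends.length with hl | hl
      · exact Or.inr ⟨hl, hhigh lo hl (by omega)⟩
      · exact Or.inl (by omega)

-- ===== VERDICT (by name: the statement is the Claim_ definition above) =====
theorem find_sent_spec : Claim_equal_find_sent := by
  intro l ans_start _hdom _hpre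
  unfold Spec_find_sent
  simp only [find_sent, find_sent_alt]
  by_cases h1 : l.length = 1
  · simp [h1]
  · rw [if_neg h1, if_neg h1]
    have hbs := bsearch_eq_findIdx_fuel (buildEnds 0 l) ans_start (pairwise_buildEnds 0 l)
      (buildEnds 0 l).length 0 (buildEnds 0 l).length (by omega) (by omega) (le_refl _)
      (by intro j hj; omega) (by intro j hj hge; omega)
    have hgo := go_eq_findIdx ans_start l 0 0
    rw [hgo]
    set k := (buildEnds 0 l).findIdx (fun x => decide (ans_start < x)) with hk
    have hlen : (buildEnds 0 l).length = l.length := length_buildEnds 0 l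
    rw [hbs]
    have hkle : k ≤ l.length := by
      have := List.findIdx_le_length (p := fun x => decide (ans_start < x)) (xs := buildEnds 0 l)
      omega
    by_cases hkl : k < l.length
    · rw [if_pos hkl, if_neg (by omega)]
      simp
    · rw [if_neg hkl, if_pos (by omega)]
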